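-- pv_equiv track=rewrite | github.com/Trogluddite/2023AoC | day9/day9a.py | reduceVals
-- ===== SOURCE A (Python) =====
-- def reduceVals(lineVals):
--     lines = [lineVals]
--     foundZeros = False
--     while not foundZeros:
--         newLine = list()
--         currLine = lines[-1]
--         pairs = [(x-1, x) for x in range(1,len(currLine))]
--         for p in pairs:
--             newLine.append( abs(currLine[p[1]] - currLine[p[0]]) )
--         lines.append(newLine)
--         if all(x==0 for x in newLine):
--             foundZeros = True
--     return(lines)
-- ===== SOURCE B (Python) =====
-- def reduceVals(lineVals):
--     diff = [abs(b - a) for a, b in zip(lineVals, lineVals[1:])]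
--     if not any(diff):
--         return [lineVals, diff]
--     return [lineVals] + reduceVals(diff)
-- ===== Notes on version B (the rewrite author's own statement) =====
-- stated objective: simpler
-- what changed: Replaces A's while loop that maintains a growing lines accumulator, index-pair construction and flag-driven all-zero post-check by a direct recursion on the difference row that builds the output front-to-back by list concatenation.
import Mathlib
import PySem

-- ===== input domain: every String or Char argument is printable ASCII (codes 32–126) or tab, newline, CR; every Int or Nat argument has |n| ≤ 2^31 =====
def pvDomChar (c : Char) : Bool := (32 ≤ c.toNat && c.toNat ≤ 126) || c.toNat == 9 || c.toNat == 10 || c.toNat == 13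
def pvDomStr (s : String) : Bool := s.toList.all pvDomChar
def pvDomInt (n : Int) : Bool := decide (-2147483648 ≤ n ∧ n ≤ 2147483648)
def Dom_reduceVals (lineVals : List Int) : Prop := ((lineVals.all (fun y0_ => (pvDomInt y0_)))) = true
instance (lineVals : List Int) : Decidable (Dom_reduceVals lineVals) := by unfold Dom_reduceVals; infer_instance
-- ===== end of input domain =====

-- B replaces A's accumulator while loop (index pairs, flag, all-zero post-check) by a
-- direct recursion on the difference row that builds the output front-to-back (simpler).

-- ===== PORT A =====
-- length of the appended-to accumulator, needed for the loop's termination measure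
theorem pvFoldlAppendLen (l : List (Int × Int)) (f : Int × Int → Int) :
    ∀ acc : List Int, (l.foldl (fun a p => a ++ [f p]) acc).length = acc.length + l.length := by
  induction l with
  | nil => intro acc; simp
  | cons p t ih =>
      intro acc
      simp only [List.foldl_cons]
      rw [ih]
      simp
      omega

-- the while loop of A: `lines` grows, `currLine = lines[-1]`; indices from range(1, len)
-- are always in range, so pyGetD … 0 is exact here.
def reduceValsLoop (lines : List (List Int)) (currLine : List Int) : List (List Int) :=
  let pairs := (PySem.List.pyRange 1 (currLine.length : Int) 1).map (fun x => (x - 1, x))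
  let newLine := pairs.foldl
    (fun acc p => acc ++ [|PySem.List.pyGetD currLine p.2 0 - PySem.List.pyGetD currLine p.1 0|]) []
  if newLine.all (· == 0) then lines ++ [newLine]
  else reduceValsLoop (lines ++ [newLine]) newLine
termination_by currLine.length
decreasing_by
  rename_i hall
  set pr := (PySem.List.pyRange 1 (currLine.length : Int) 1).map (fun x => (x - 1, x)) with hpr
  set nl := pr.foldl (fun acc p => acc ++ [|PySem.List.pyGetD currLine p.2 0 - PySem.List.pyGetD currLine p.1 0|]) [] with hnl
  have hlen : nl.length = pr.length := by rw [hnl, pvFoldlAppendLen]; simp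
  have hne : nl ≠ [] := by
    intro h
    apply hall
    have heq : newLine = nl := rfl
    rw [heq, h]
    simp
  have hpl : pr.length = ((currLine.length : Int) - 1).toNat := by
    rw [hpr]; simp [PySem.List.length_pyRange_one]
  have : 0 < nl.length := List.length_pos_iff.mpr hne
  omega

def reduceVals (lineVals : List Int) : List (List Int) :=
  reduceValsLoop [lineVals] lineVals

-- ===== PORT B =====
-- diff = [abs(b-a) for a,b in zip(lineVals, lineVals[1:])]; if not any(diff): [lineVals, diff]
-- else [lineVals] + reduceVals(diff)
def reduceVals_alt (lineVals : List Int) : List (List Int) :=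
  let diff := (lineVals.zip lineVals.tail).map (fun p => |p.2 - p.1|)
  if !(diff.any (· != 0)) then [lineVals, diff]
  else lineVals :: reduceVals_alt diff
termination_by lineVals.length
decreasing_by
  rename_i hany
  simp only [Bool.not_eq_eq_eq_not, Bool.not_true, Bool.not_eq_false] at hany
  have hany' : ((lineVals.zip lineVals.tail).map (fun p => |p.2 - p.1|)).any (· != 0) = true := hany
  have hne : (lineVals.zip lineVals.tail).map (fun p => |p.2 - p.1|) ≠ [] := by
    intro h; rw [h] at hany'; simp at hany' 
  have h0 : 0 < lineVals.length := by
    rcases lineVals with _ | ⟨a, t⟩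
    · simp at hne
    · simp
  simp
  omega

-- ===== PRECONDITION & SPEC =====
def Spec_reduceVals (lineVals : List Int) (out : List (List Int)) : Prop := out = reduceVals_alt lineVals
instance (lineVals : List Int) (out : List (List Int)) : Decidable (Spec_reduceVals lineVals out) := by unfold Spec_reduceVals; infer_instance

-- ===== CLAIM (what is proved, stated in full; the proofs are below) =====
def Claim_equal_reduceVals : Prop := ∀ (lineVals : List Int), Dom_reduceVals lineVals → Spec_reduceVals lineVals (reduceVals lineVals)

-- ===== LEMMAS AND PROOFS =====

def diffRow (row : List Int) : List Int :=
  (row.zip row.tail).map (fun p => |p.2 - p.1|)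

-- A's loop body computes exactly diffRow of the current line.
theorem newLine_eq_diffRow (curr : List Int) :
    ((PySem.List.pyRange 1 (curr.length : Int) 1).map (fun x => (x - 1, x))).foldl
      (fun acc p => acc ++ [|PySem.List.pyGetD curr p.2 0 - PySem.List.pyGetD curr p.1 0|]) []
    = diffRow curr := by
  rw [PySem.List.foldl_append_singleton_eq_map]
  simp only [List.nil_append, List.map_map]
  rw [PySem.List.pyRange_one]
  simp only [List.map_map]
  apply List.ext_getElem
  · simp [diffRow]
  · intro i h1 h2
    simp only [List.getElem_map, List.getElem_range, Function.comp_apply]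
    have hi : i + 1 < curr.length := by
      simp at h1; omega
    have e1 : (1 : Int) + i - 1 = (i : Int) := by ring
    have e2 : ((1 : Int) + i) = ((i + 1 : Nat) : Int) := by push_cast; ring
    rw [e1, e2, PySem.List.pyGetD_natCast, PySem.List.pyGetD_natCast]
    have e3 : curr.getD (i + 1) 0 = curr[i + 1] := List.getD_eq_getElem _ _ hi
    have e4 : curr.getD i 0 = curr[i] := List.getD_eq_getElem _ _ (by omega)
    rw [e3, e4]
    simp [diffRow, List.getElem_tail]

theorem all_zero_iff_not_any (l : List Int) : l.all (· == 0) = !(l.any (· != 0)) := by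
  induction l with
  | nil => rfl
  | cons x t ih => cases h : x == 0 <;> simp [List.all_cons, List.any_cons, ih, bne, h]

-- B's result always starts with its input row.
theorem alt_head (curr : List Int) : reduceVals_alt curr = curr :: (reduceVals_alt curr).tail := by
  rw [reduceVals_alt.eq_def]
  simp only []
  split <;> simp

-- loop invariant: the while loop appends exactly the tail of B's recursive result.
theorem loop_eq (n : Nat) : ∀ (curr : List Int), curr.length = n →
    ∀ lines, reduceValsLoop lines curr = lines ++ (reduceVals_alt curr).tail := by
  induction n using Nat.strong_induction_on with
  | _ n ih =>
    intro curr hlen lines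
    rw [reduceValsLoop.eq_def]
    simp only []
    rw [newLine_eq_diffRow, all_zero_iff_not_any]
    rw [reduceVals_alt.eq_def]
    simp only []
    by_cases hany : (diffRow curr).any (· != 0) = true
    · have hne : diffRow curr ≠ [] := by intro h; simp [h] at hany
      have hlt : (diffRow curr).length < n := by
        have h0 : 0 < curr.length := by
          rcases curr with _ | ⟨a, t⟩
          · simp [diffRow] at hne
          · simp
        have h1 : (diffRow curr).length = curr.length - 1 := by simp [diffRow]
        omega
      rw [show ((curr.zip curr.tail).map (fun p => |p.2 - p.1|)) = diffRow curr from rfl]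
      simp only [hany, Bool.not_true, Bool.false_eq_true, if_false]
      rw [ih _ hlt _ rfl (lines ++ [diffRow curr])]
      rw [List.tail_cons, List.append_assoc]
      conv_rhs => rw [alt_head (diffRow curr)]
      simp
    · rw [show ((curr.zip curr.tail).map (fun p => |p.2 - p.1|)) = diffRow curr from rfl]
      simp only [hany]
      simp

-- ===== VERDICT (by name: the statement is the Claim_ definition above) =====
theorem reduceVals_spec : Claim_equal_reduceVals := by
  intro lineVals _
  unfold Spec_reduceVals reduceVals
  rw [loop_eq lineVals.length lineVals rfl [lineVals]]
  conv_rhs => rw [alt_head lineVals]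
  rfl
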